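-- pv_equiv track=rewrite | github.com/raeez/chiral-bar-cobar | compute/lib/genus1_pbw_sl2.py | _tensor_weight_of_index
-- ===== SOURCE A (Python) =====
-- DIM_SL2 = 3  # basis: e=0, h=1, f=2
--
-- def _tensor_weight_of_index(index: int, power: int) -> int:
--     """Total Cartan weight of a tensor basis index in ``g^{\\otimes power}``.
--
--     We use ad(h)-weights: ``wt(e)=+1``, ``wt(h)=0``, ``wt(f)=-1``.
--     """
--     weight = 0
--     value = index
--     for _ in range(power):
--         digit = value % DIM_SL2
--         if digit == 0:  # e
--             weight += 1
--         elif digit == 2:  # f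
--             weight -= 1
--         value //= DIM_SL2
--     return weight
-- ===== SOURCE B (Python) =====
-- DIM_SL2 = 3  # basis: e=0, h=1, f=2
--
-- def _tensor_weight_of_index(index: int, power: int) -> int:
--     """Total Cartan weight of a tensor basis index in ``g^{\\otimes power}``.
--
--     Each base-3 digit d contributes 1 - d, so the weight is
--     power - (sum of the low ``power`` base-3 digits of index).
--     The low digits are isolated as ``index % 3**power`` (a nonnegative
--     value < 3**power), whose full base-3 digit sum is computed by
--     divide-and-conquer: split the p-digit block into halves with one
--     divmod by 3**(p//2) and recurse.
--     """
--     if power <= 0: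
--         return 0
--     return power - _digit_sum(index % DIM_SL2 ** power, power)
--
-- def _digit_sum(v: int, p: int) -> int:
--     """Sum of base-3 digits of v, where 0 <= v < 3**p and p >= 1."""
--     if p <= 1:
--         return v
--     half = p // 2
--     q, r = divmod(v, DIM_SL2 ** half)
--     return _digit_sum(q, p - half) + _digit_sum(r, half)
-- ===== Notes on version B (the rewrite author's own statement) =====
-- stated objective: alternative
-- what changed: Replaces A's per-digit loop (power iterations of %3 and //=3) with the identity weight = power - digit_sum: B isolates the low digits once as index % 3**power and computes their base-3 digit sum by divide-and-conquer, splitting the p-digit block in half with a single divmod by 3**(p//2) and recursing.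
import Mathlib
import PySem

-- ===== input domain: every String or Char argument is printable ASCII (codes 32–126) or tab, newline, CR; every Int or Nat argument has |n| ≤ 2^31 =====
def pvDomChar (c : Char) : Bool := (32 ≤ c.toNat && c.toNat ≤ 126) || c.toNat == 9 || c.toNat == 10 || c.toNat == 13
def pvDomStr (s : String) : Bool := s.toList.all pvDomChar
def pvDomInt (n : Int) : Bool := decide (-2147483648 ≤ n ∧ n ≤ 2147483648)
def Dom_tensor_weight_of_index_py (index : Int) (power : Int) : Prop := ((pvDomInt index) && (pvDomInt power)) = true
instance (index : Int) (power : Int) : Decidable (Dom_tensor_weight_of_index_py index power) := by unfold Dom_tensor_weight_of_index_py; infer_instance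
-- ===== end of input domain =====

-- B replaces A's per-digit loop by weight = power - digit_sum(index % 3^power), computing that
-- digit sum by divide-and-conquer on the digit block (one divmod by 3^(p//2) per split); an
-- alternative decomposition of the same cost class, not claimed faster.

-- ===== PORT A =====
def tensor_weight_of_index_py (index : Int) (power : Int) : Int :=
  (((PySem.List.pyRange 0 power 1).foldl
      (fun (st : Int × Int) _ =>
        let digit := PySem.Int.mod st.2 3
        let weight := if digit = 0 then st.1 + 1 else if digit = 2 then st.1 - 1 else st.1
        (weight, PySem.Int.floordiv st.2 3))
      (0, index))).1

-- ===== PORT B =====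
-- _digit_sum(v, p): recursion on p (halved each call), ported with p : Nat (p ≥ 0 at all call sites)
def pyDigitSum (v : Int) (p : Nat) : Int :=
  if _h : p ≤ 1 then v
  else
    let half := p / 2
    let q := PySem.Int.floordiv v (3 ^ half)
    let r := PySem.Int.mod v (3 ^ half)
    pyDigitSum q (p - half) + pyDigitSum r half
termination_by p
decreasing_by all_goals omega

def tensor_weight_of_index_py_alt (index : Int) (power : Int) : Int :=
  if power ≤ 0 then 0
  else power - pyDigitSum (PySem.Int.mod index (3 ^ power.toNat)) power.toNat

-- ===== PRECONDITION & SPEC =====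
def Spec_tensor_weight_of_index_py (index : Int) (power : Int) (out : Int) : Prop := out = tensor_weight_of_index_py_alt index power
instance (index : Int) (power : Int) (out : Int) : Decidable (Spec_tensor_weight_of_index_py index power out) := by unfold Spec_tensor_weight_of_index_py; infer_instance

-- ===== CLAIM =====
def Claim_equal_tensor_weight_of_index_py : Prop := ∀ (index : Int) (power : Int), Dom_tensor_weight_of_index_py index power → Spec_tensor_weight_of_index_py index power (tensor_weight_of_index_py index power)

-- ===== LEMMAS AND PROOFS =====

-- sum of the n low base-3 digits of v (Python floor semantics = ediv/emod since 3 > 0)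
def digS : Nat → Int → Int
  | 0, _ => 0
  | n + 1, v => v % 3 + digS n (v / 3)

-- A's fold computes w + len - digS len v
theorem foldA_eq (l : List Int) (w v : Int) :
    ((l.foldl
        (fun (st : Int × Int) _ =>
          let digit := PySem.Int.mod st.2 3
          let weight := if digit = 0 then st.1 + 1 else if digit = 2 then st.1 - 1 else st.1
          (weight, PySem.Int.floordiv st.2 3))
        (w, v))).1 = w + l.length - digS l.length v := by
  induction l generalizing w v with
  | nil => simp [digS]
  | cons a t ih =>
      simp only [List.foldl_cons, List.length_cons, digS]
      rw [ih]
      rw [PySem.Int.mod_eq_emod_of_pos (by norm_num : (0:Int) < 3),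
          PySem.Int.floordiv_eq_ediv_of_pos (by norm_num : (0:Int) < 3)]
      have hb := Int.emod_nonneg v (by norm_num : (3:Int) ≠ 0)
      have hub := Int.emod_lt_of_pos v (by norm_num : (0:Int) < 3)
      rcases (by omega : v % 3 = 0 ∨ v % 3 = 1 ∨ v % 3 = 2) with h | h | h <;>
        simp [h] <;> ring

-- splitting the digit block: low a digits of v plus b digits of v / 3^a
theorem digS_add (a b : Nat) (v : Int) :
    digS (a + b) v = digS a v + digS b (v / 3 ^ a) := by
  induction a generalizing v with
  | zero => simp [digS]
  | succ a ih =>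
      have : a + 1 + b = (a + b) + 1 := by omega
      rw [this]
      simp only [digS]
      rw [ih]
      rw [Int.ediv_ediv_of_nonneg (by norm_num : (0:Int) ≤ 3), pow_succ, mul_comm]
      ring

-- the n low digits only depend on v % 3^n
theorem digS_emod (n : Nat) (v : Int) : digS n (v % 3 ^ n) = digS n v := by
  induction n generalizing v with
  | zero => simp [digS]
  | succ n ih =>
      simp only [digS]
      have h3 : ((3:Int) ∣ 3 ^ (n + 1)) := dvd_pow_self 3 (by omega)
      have hmm : v % 3 ^ (n + 1) % 3 = v % 3 := Int.emod_emod_of_dvd v h3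
      have hd : v % 3 ^ (n + 1) / 3 = v / 3 % 3 ^ n := by
        have hk : (0:Int) < 3 ^ n := by positivity
        have h1 : v % 3 ^ (n + 1) = v - 3 * 3 ^ n * (v / (3 * 3 ^ n)) := by
          rw [Int.emod_def, pow_succ, mul_comm (3 ^ n) 3]
        have h2 : v / 3 % 3 ^ n = v / 3 - 3 ^ n * (v / 3 / 3 ^ n) := by
          rw [Int.emod_def]
        rw [h1, h2, Int.ediv_ediv_of_nonneg (by norm_num : (0:Int) ≤ 3)]
        have : v - 3 * 3 ^ n * (v / (3 * 3 ^ n))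
             = v + (-(3 ^ n * (v / (3 * 3 ^ n)))) * 3 := by ring
        rw [this, Int.add_mul_ediv_right _ _ (by norm_num : (3:Int) ≠ 0)]
        ring
      rw [hmm, hd, ih]

-- B's divide-and-conquer equals digS on its domain 0 ≤ u < 3^p
theorem pyDigitSum_eq (p : Nat) (u : Int) (h0 : 0 ≤ u) (h1 : u < 3 ^ p) :
    pyDigitSum u p = digS p u := by
  induction p using Nat.strong_induction_on generalizing u with
  | _ p ih =>
    rw [pyDigitSum]
    by_cases hp : p ≤ 1
    · interval_cases p
      · simp [digS] at h1 ⊢; omega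
      · simp only [digS]
        rw [Int.emod_eq_of_lt h0 (by simpa using h1)]
        simp
    · simp only [dif_neg hp]
      have hhalf : (0:Int) < 3 ^ (p / 2) := by positivity
      rw [PySem.Int.floordiv_eq_ediv_of_pos hhalf, PySem.Int.mod_eq_emod_of_pos hhalf]
      have hq0 : 0 ≤ u / 3 ^ (p / 2) := Int.ediv_nonneg h0 (le_of_lt hhalf)
      have hq1 : u / 3 ^ (p / 2) < 3 ^ (p - p / 2) := by
        rw [Int.ediv_lt_iff_lt_mul hhalf]
        calc u < 3 ^ p := h1
          _ = 3 ^ (p - p / 2) * 3 ^ (p / 2) := by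
              rw [← pow_add]; congr 1; omega
      have hr0 : 0 ≤ u % 3 ^ (p / 2) := Int.emod_nonneg u (ne_of_gt hhalf)
      have hr1 : u % 3 ^ (p / 2) < 3 ^ (p / 2) := Int.emod_lt_of_pos u hhalf
      rw [ih (p - p / 2) (by omega) _ hq0 hq1, ih (p / 2) (by omega) _ hr0 hr1]
      have hsplit : p = p / 2 + (p - p / 2) := by omega
      conv_rhs => rw [hsplit]
      rw [digS_add, ← digS_emod (p / 2) u]
      ring

-- ===== VERDICT =====
theorem tensor_weight_of_index_py_spec : Claim_equal_tensor_weight_of_index_py := by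
  intro index power _
  unfold Spec_tensor_weight_of_index_py tensor_weight_of_index_py tensor_weight_of_index_py_alt
  rw [foldA_eq, PySem.List.length_pyRange_one]
  by_cases h : power ≤ 0
  · have h0 : (power - 0).toNat = 0 := by omega
    rw [h0]; simp [h, digS]
  · have h0 : (power - 0).toNat = power.toNat := by omega
    simp only [h, if_false, h0]
    have hp3 : (0:Int) < 3 ^ power.toNat := by positivity
    rw [PySem.Int.mod_eq_emod_of_pos hp3]
    have hm0 : 0 ≤ index % 3 ^ power.toNat := Int.emod_nonneg index (ne_of_gt hp3)
    have hm1 : index % 3 ^ power.toNat < 3 ^ power.toNat := Int.emod_lt_of_pos index hp3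
    rw [pyDigitSum_eq _ _ hm0 hm1, digS_emod]
    have : ((power.toNat : Int)) = power := by omega
    rw [this]
    ring
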